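-- pv_equiv track=rewrite | github.com/pabloguarda/isuelogit | src/isuelogit/paths.py | get_ods_paths_idxs
-- ===== SOURCE A (Python) =====
-- def get_ods_paths_idxs(paths_od):
--
--     ods_paths_idxs = {}
--
--     counter = 0
--
--     for od,paths in paths_od.items():
--
--         ods_paths_idxs[od] = []
--
--         for path in paths:
--             ods_paths_idxs[od].append(counter)
--             counter+=1
--
--     return ods_paths_idxs
-- ===== SOURCE B (Python) =====
-- def get_ods_paths_idxs(paths_od):
--     # Stage 1: flatten the groups into one stream of od labels, one per path.
--     labels = [od for od, paths in paths_od.items() for _ in paths]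
--     # Stage 2: each od's indices are the positions where its label occurs.
--     return {od: [i for i, lab in enumerate(labels) if lab == od]
--             for od in paths_od}
-- ===== Notes on version B (the rewrite author's own statement) =====
-- stated objective: alternative
-- what changed: Instead of a running counter incremented per path, B first flattens the groups into a single stream of od labels and then recovers each od's index list as the positions where its label occurs in that stream (enumerate + equality filter); no counter state is threaded through the loops.
import Mathlib
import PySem

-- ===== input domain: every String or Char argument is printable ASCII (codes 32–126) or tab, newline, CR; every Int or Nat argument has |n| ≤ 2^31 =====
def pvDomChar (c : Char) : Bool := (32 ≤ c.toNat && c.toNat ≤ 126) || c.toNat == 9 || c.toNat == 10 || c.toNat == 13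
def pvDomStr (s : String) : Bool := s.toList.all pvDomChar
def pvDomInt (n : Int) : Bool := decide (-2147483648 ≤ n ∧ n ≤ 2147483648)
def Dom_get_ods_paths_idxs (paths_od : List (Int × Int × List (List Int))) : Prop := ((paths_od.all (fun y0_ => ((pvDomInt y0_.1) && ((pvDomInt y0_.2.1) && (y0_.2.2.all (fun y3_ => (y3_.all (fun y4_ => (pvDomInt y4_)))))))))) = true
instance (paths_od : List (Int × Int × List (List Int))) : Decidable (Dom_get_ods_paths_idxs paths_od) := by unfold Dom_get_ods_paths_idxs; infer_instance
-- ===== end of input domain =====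

-- B drops A's threaded counter: it flattens the groups to a stream of od labels and recovers each
-- od's indices as the positions of its label in that stream (objective: alternative).

-- ===== PORT A =====
-- nested loop: outer state = (result so far, counter); inner loop appends the counter per path
def get_ods_paths_idxs (paths_od : List (Int × Int × List (List Int))) : List (Int × Int × List Int) :=
  (paths_od.foldl
    (fun (st : List (Int × Int × List Int) × Int) e =>
      let inner := e.2.2.foldl (fun (p : List Int × Int) _ => (p.1 ++ [p.2], p.2 + 1)) ([], st.2)
      (st.1 ++ [(e.1, e.2.1, inner.1)], inner.2))
    ([], 0)).1

-- ===== PORT B =====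
-- Stage 1: labels = [od for od, paths in paths_od.items() for _ in paths]
def pvLabels (paths_od : List (Int × Int × List (List Int))) : List (Int × Int) :=
  paths_od.flatMap (fun e => e.2.2.map (fun _ => (e.1, e.2.1)))

-- Stage 2: {od: [i for i, lab in enumerate(labels) if lab == od] for od in paths_od}
def get_ods_paths_idxs_alt (paths_od : List (Int × Int × List (List Int))) : List (Int × Int × List Int) :=
  let labels := pvLabels paths_od
  paths_od.map (fun e =>
    (e.1, e.2.1,
      ((PySem.List.enumerate labels 0).filter (fun p => p.2 == (e.1, e.2.1))).map (fun p => p.1)))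

-- ===== PRECONDITION & SPEC =====
-- Pre_ requires the od keys to be pairwise distinct: paths_od is a Python dict keyed by od, so A
-- can never be called on an association list with duplicate keys (it encodes no dict input).
def Pre_get_ods_paths_idxs (paths_od : List (Int × Int × List (List Int))) : Prop :=
  (paths_od.map (fun e => (e.1, e.2.1))).Nodup
instance (paths_od : List (Int × Int × List (List Int))) : Decidable (Pre_get_ods_paths_idxs paths_od) := by unfold Pre_get_ods_paths_idxs; infer_instance

def pvWitness_get_ods_paths_idxs : (List (Int × Int × List (List Int))) :=
  [(1, 2, [[3], [4, 5]]), (1, 3, []), (0, 2, [[7]])]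

def Spec_get_ods_paths_idxs (paths_od : List (Int × Int × List (List Int))) (out : List (Int × Int × List Int)) : Prop := out = get_ods_paths_idxs_alt paths_od
instance (paths_od : List (Int × Int × List (List Int))) (out : List (Int × Int × List Int)) : Decidable (Spec_get_ods_paths_idxs paths_od out) := by unfold Spec_get_ods_paths_idxs; infer_instance

-- ===== CLAIM (what is proved, stated in full; the proofs are below) =====
def Claim_equal_get_ods_paths_idxs : Prop := ∀ (paths_od : List (Int × Int × List (List Int))), Dom_get_ods_paths_idxs paths_od → Pre_get_ods_paths_idxs paths_od → Spec_get_ods_paths_idxs paths_od (get_ods_paths_idxs paths_od)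

-- ===== LEMMAS AND PROOFS =====

-- common range form both sides are reduced to
def pvCanon (start : Int) : List (Int × Int × List (List Int)) → List (Int × Int × List Int)
  | [] => []
  | e :: rest =>
    (e.1, e.2.1, PySem.List.pyRange start (start + e.2.2.length) 1)
      :: pvCanon (start + e.2.2.length) rest

-- A's inner loop produces exactly range(c, c+len ps) and advances the counter by len ps
theorem pv_inner_eq (ps : List (List Int)) (acc : List Int) (c : Int) :
    ps.foldl (fun (p : List Int × Int) _ => (p.1 ++ [p.2], p.2 + 1)) (acc, c)
      = (acc ++ PySem.List.pyRange c (c + ps.length) 1, c + ps.length) := by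
  induction ps generalizing acc c with
  | nil => simp [PySem.List.pyRange]
  | cons h t ih =>
    simp only [List.foldl_cons, ih, List.length_cons, Nat.cast_add, Nat.cast_one]
    have hlt : c < c + ((t.length : Int) + 1) := by omega
    conv_rhs => rw [PySem.List.pyRange_one_cons hlt]
    have he : c + 1 + (t.length : Int) = c + ((t.length : Int) + 1) := by ring
    rw [he]
    simp [List.append_assoc]

-- A's outer loop equals the canonical range form from the same start
theorem pv_outer_eq (entries : List (Int × Int × List (List Int)))
    (out : List (Int × Int × List Int)) (c : Int) :
    entries.foldl
      (fun (st : List (Int × Int × List Int) × Int) e =>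
        let inner := e.2.2.foldl (fun (p : List Int × Int) _ => (p.1 ++ [p.2], p.2 + 1)) ([], st.2)
        (st.1 ++ [(e.1, e.2.1, inner.1)], inner.2))
      (out, c)
      = (out ++ pvCanon c entries,
         c + ((entries.map (fun e => (e.2.2.length : Int))).sum)) := by
  induction entries generalizing out c with
  | nil => simp [pvCanon]
  | cons e rest ih =>
    rw [List.foldl_cons, ih]
    simp only [pv_inner_eq, pvCanon, List.map_cons, List.sum_cons, List.nil_append,
      Prod.mk.injEq]
    exact ⟨by simp, by ring⟩

-- every label in pvLabels entries is the key of some entry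
theorem pv_mem_labels {l : Int × Int} {entries : List (Int × Int × List (List Int))}
    (h : l ∈ pvLabels entries) : ∃ e ∈ entries, l = (e.1, e.2.1) := by
  simp only [pvLabels, List.mem_flatMap, List.mem_map] at h
  obtain ⟨e, he, _, _, rfl⟩ := h
  exact ⟨e, he, rfl⟩

-- second components of an enumeration are the list itself
theorem pv_snd_mem {L : List (Int × Int)} {s : Int} {p : Int × (Int × Int)}
    (hp : p ∈ PySem.List.enumerate L s) : p.2 ∈ L := by
  have : p.2 ∈ (PySem.List.enumerate L s).map (fun q => q.2) := List.mem_map_of_mem hp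
  rwa [PySem.List.map_snd_enumerate] at this

-- filtering the enumeration for a key absent from the labels yields nothing
theorem pv_filter_none {L : List (Int × Int)} {k : Int × Int} (s : Int)
    (h : ∀ l ∈ L, l ≠ k) :
    (PySem.List.enumerate L s).filter (fun p => p.2 == k) = [] := by
  rw [List.filter_eq_nil_iff]
  intro p hp
  simpa using h _ (pv_snd_mem hp)

-- filtering the enumeration of a constant-label block keeps everything
theorem pv_filter_all {L : List (Int × Int)} {k : Int × Int} (s : Int)
    (h : ∀ l ∈ L, l = k) :
    (PySem.List.enumerate L s).filter (fun p => p.2 == k) = PySem.List.enumerate L s := by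
  rw [List.filter_eq_self]
  intro p hp
  simp [h _ (pv_snd_mem hp)]

-- B equals the canonical range form, for any start offset, given distinct keys
theorem pv_b_eq (entries : List (Int × Int × List (List Int))) (s : Int)
    (hnd : (entries.map (fun e => (e.1, e.2.1))).Nodup) :
    entries.map (fun e =>
      (e.1, e.2.1,
        ((PySem.List.enumerate (pvLabels entries) s).filter
            (fun p => p.2 == (e.1, e.2.1))).map (fun p => p.1)))
      = pvCanon s entries := by
  induction entries generalizing s with
  | nil => rfl
  | cons x rest ih =>
    have hlab : pvLabels (x :: rest)
        = x.2.2.map (fun _ => (x.1, x.2.1)) ++ pvLabels rest := by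
      simp [pvLabels]
    rw [List.map_cons, hlab, PySem.List.enumerate_append]
    simp only [List.map_cons, List.nodup_cons, List.mem_map] at hnd
    obtain ⟨hx, hrest⟩ := hnd
    -- head entry: first block kept entirely, rest contributes nothing
    have hhead :
        ((PySem.List.enumerate (x.2.2.map (fun _ => (x.1, x.2.1))) s ++
            PySem.List.enumerate (pvLabels rest) (s + (x.2.2.map (fun _ => (x.1, x.2.1))).length)).filter
          (fun p => p.2 == (x.1, x.2.1))).map (fun p => p.1)
        = PySem.List.pyRange s (s + x.2.2.length) 1 := by
      rw [List.filter_append,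
        pv_filter_all _ (by intro l hl; obtain ⟨a, -, rfl⟩ := List.mem_map.1 hl; rfl),
        pv_filter_none _ (by
          intro l hl hlk
          obtain ⟨e, he, rfl⟩ := pv_mem_labels hl
          exact hx ⟨e, he, hlk⟩),
        List.append_nil, PySem.List.map_fst_enumerate]
      simp
    rw [hhead]
    -- tail entries: first block contributes nothing; reduce to the rest's labels
    have htail : rest.map (fun e =>
        (e.1, e.2.1,
          ((PySem.List.enumerate (x.2.2.map (fun _ => (x.1, x.2.1))) s ++
              PySem.List.enumerate (pvLabels rest) (s + (x.2.2.map (fun _ => (x.1, x.2.1))).length)).filter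
            (fun p => p.2 == (e.1, e.2.1))).map (fun p => p.1)))
        = rest.map (fun e =>
        (e.1, e.2.1,
          ((PySem.List.enumerate (pvLabels rest) (s + x.2.2.length)).filter
            (fun p => p.2 == (e.1, e.2.1))).map (fun p => p.1))) := by
      refine List.map_congr_left ?_
      intro e he
      rw [List.filter_append,
        pv_filter_none _ (by
          intro l hl hlk
          obtain ⟨_, _, rfl⟩ := List.mem_map.1 hl
          exact hx ⟨e, he, hlk.symm⟩)]
      simp
    rw [htail, ih _ hrest]
    simp [pvCanon]

-- ===== VERDICT (by name: the statement is the Claim_ definition above) =====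
theorem get_ods_paths_idxs_spec : Claim_equal_get_ods_paths_idxs := by
  intro paths_od _ hpre
  unfold Spec_get_ods_paths_idxs get_ods_paths_idxs get_ods_paths_idxs_alt
  rw [pv_outer_eq]
  simp only [List.nil_append]
  exact (pv_b_eq paths_od 0 hpre).symm
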